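-- pv_equiv track=rewrite | github.com/amirhamzakhan2001/nlp-email-categorization | streamlitv2.py | aggregate_counts_over_tree
-- ===== SOURCE A (Python) =====
-- from typing import Dict, List, Tuple
--
-- def aggregate_counts_over_tree(children_map: Dict[str,List[str]], leaf_counts: Dict[str,int]) -> Dict[str,int]:
--     """
--     Post-order sum of counts. leaf_counts keys match leaf cluster ids (but may also contain intermediate nodes).
--     Returns node_counts map for all nodes in children_map.
--     """
--     node_counts = {}
--     nodes_sorted = sorted(list(children_map.keys()), key=lambda x: x.count("."), reverse=True)
--     for node in nodes_sorted:
--         kids = children_map.get(node, [])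
--         if not kids:
--             node_counts[node] = int(leaf_counts.get(node, 0))
--         else:
--             s = 0
--             for c in kids:
--                 s += int(node_counts.get(c, 0))
--             s += int(leaf_counts.get(node, 0))
--             node_counts[node] = s
--     return node_counts
-- ===== SOURCE B (Python) =====
-- def aggregate_counts_over_tree(children_map, leaf_counts):
--     # Scatter ("push") propagation over a reverse-adjacency map: each node,
--     # once its total is known, pushes it up to its parents; no node ever
--     # pulls from its children.
--     parents = {}
--     for p, kids in children_map.items():
--         for c in kids:
--             parents.setdefault(c, []).append(p)
--     incoming = {}
--     node_counts = {}
--     for node in sorted(children_map, key=lambda x: x.count("."), reverse=True):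
--         v = int(leaf_counts.get(node, 0)) + incoming.get(node, 0)
--         node_counts[node] = v
--         for p in parents.get(node, []):
--             incoming[p] = incoming.get(p, 0) + v
--     return node_counts
-- ===== Notes on version B (the rewrite author's own statement) =====
-- stated objective: alternative
-- what changed: Replaces A's gather step (each parent pulls its children's totals out of node_counts) with scatter propagation over a precomputed reverse-adjacency (parents) map: each node, once its total is fixed, pushes it up to its parents, so no node ever reads its children.
import Mathlib
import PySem

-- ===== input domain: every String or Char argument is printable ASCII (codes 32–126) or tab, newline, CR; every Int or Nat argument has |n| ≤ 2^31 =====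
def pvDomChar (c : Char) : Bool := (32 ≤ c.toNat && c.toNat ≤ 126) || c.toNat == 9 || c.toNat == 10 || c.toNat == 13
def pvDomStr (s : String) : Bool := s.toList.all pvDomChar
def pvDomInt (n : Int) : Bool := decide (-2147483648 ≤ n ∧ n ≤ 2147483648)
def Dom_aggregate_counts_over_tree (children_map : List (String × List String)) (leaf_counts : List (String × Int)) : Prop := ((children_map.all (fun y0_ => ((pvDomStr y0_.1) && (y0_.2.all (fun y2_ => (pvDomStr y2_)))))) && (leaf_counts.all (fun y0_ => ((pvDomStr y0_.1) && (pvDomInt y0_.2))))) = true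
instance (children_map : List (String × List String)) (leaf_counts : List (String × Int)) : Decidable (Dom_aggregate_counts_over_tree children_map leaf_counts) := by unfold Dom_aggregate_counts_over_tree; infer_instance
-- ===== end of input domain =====

-- B replaces A's gather step (each parent pulls its children's totals out of
-- node_counts) by scatter propagation over a reverse-adjacency (parents) map:
-- each node, once finished, pushes its total up to its parents (objective:
-- alternative algorithm, same result; neither version mutates its arguments).

-- ===== PORT A =====
-- x.count(".") — the sort key, a Python int
def pvDot (x : String) : Int := (PySem.Str.count x "." : Int)

-- the body of A's 'for node in nodes_sorted' loop
def pvStepA (cmd : PySem.Dict String (List String)) (lcd : PySem.Dict String Int)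
    (nc : PySem.Dict String Int) (node : String) : PySem.Dict String Int :=
  let kids := cmd.getD node []
  if kids = [] then
    nc.insert node (lcd.getD node 0)
  else
    nc.insert node (kids.foldl (fun s c => s + nc.getD c 0) 0 + lcd.getD node 0)

def aggregate_counts_over_tree (children_map : List (String × List String)) (leaf_counts : List (String × Int)) : List (String × Int) :=
  let cmd := PySem.Dict.ofList children_map
  let lcd := PySem.Dict.ofList leaf_counts
  let nodes_sorted := PySem.List.sorted cmd.keys pvDot true
  (nodes_sorted.foldl (pvStepA cmd lcd) PySem.Dict.empty).items

-- ===== PORT B =====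
-- the body of B's main loop: finish node (leaf count + what its children
-- pushed so far), then push its value v to every parent occurrence
def pvStepB (parents : PySem.Dict String (List String)) (lcd : PySem.Dict String Int)
    (st : PySem.Dict String Int × PySem.Dict String Int) (node : String) :
    PySem.Dict String Int × PySem.Dict String Int :=
  let v := lcd.getD node 0 + st.2.getD node 0
  (st.1.insert node v,
   (parents.getD node []).foldl (fun inc p => inc.modify p 0 (· + v)) st.2)

def aggregate_counts_over_tree_alt (children_map : List (String × List String)) (leaf_counts : List (String × Int)) : List (String × Int) :=
  let cmd := PySem.Dict.ofList children_map
  let lcd := PySem.Dict.ofList leaf_counts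
  -- 'for p, kids in children_map.items(): for c in kids: parents.setdefault(c, []).append(p)'
  let parents := cmd.items.foldl
    (fun b pk => pk.2.foldl (fun b c => b.modify c [] (· ++ [pk.1])) b)
    (PySem.Dict.empty : PySem.Dict String (List String))
  ((PySem.List.sorted cmd.keys pvDot true).foldl (pvStepB parents lcd)
      (PySem.Dict.empty, PySem.Dict.empty)).1.items

-- ===== PRECONDITION & SPEC =====
def Spec_aggregate_counts_over_tree (children_map : List (String × List String)) (leaf_counts : List (String × Int)) (out : List (String × Int)) : Prop := out = aggregate_counts_over_tree_alt children_map leaf_counts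
instance (children_map : List (String × List String)) (leaf_counts : List (String × Int)) (out : List (String × Int)) : Decidable (Spec_aggregate_counts_over_tree children_map leaf_counts out) := by unfold Spec_aggregate_counts_over_tree; infer_instance

-- ===== CLAIM (what is proved, stated in full; the proofs are below) =====
def Claim_equal_aggregate_counts_over_tree : Prop := ∀ (children_map : List (String × List String)) (leaf_counts : List (String × Int)), Dom_aggregate_counts_over_tree children_map leaf_counts → Spec_aggregate_counts_over_tree children_map leaf_counts (aggregate_counts_over_tree children_map leaf_counts)

-- ===== LEMMAS AND PROOFS =====

-- B's nested parents-building loop is the edge-list loop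
theorem pvParentsFold (its : List (String × List String)) (d : PySem.Dict String (List String)) :
    its.foldl (fun b pk => pk.2.foldl (fun b c => b.modify c [] (· ++ [pk.1])) b) d
      = (its.flatMap (fun pk => pk.2.map (fun c => (c, pk.1)))).foldl
          (fun d p => d.modify p.1 [] (· ++ [p.2])) d := by
  induction its generalizing d with
  | nil => rfl
  | cons pk t ih => simp [List.foldl_append, List.foldl_map, ih]

-- how often q occurs among the parents recorded for node
theorem pvCountEdges (ks : List String) (g : String → List String) (node q : String)
    (hnd : ks.Nodup) :
    (((ks.flatMap (fun p => (g p).map (fun c => (c, p)))).filter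
        (fun e => e.1 == node)).map Prod.snd).count q
      = if q ∈ ks then (g q).count node else 0 := by
  induction ks with
  | nil => simp
  | cons p t ih =>
      have hnd' := (List.nodup_cons.1 hnd).2
      have hpt := (List.nodup_cons.1 hnd).1
      rw [List.flatMap_cons, List.filter_append, List.map_append, List.count_append,
        ih hnd']
      have hhead : ((((g p).map (fun c => (c, p))).filter (fun e => e.1 == node)).map
          Prod.snd).count q = if q = p then (g p).count node else 0 := by
        rw [List.filter_map, List.map_map]
        have : ((g p).filter ((fun e => e.1 == node) ∘ (fun c => (c, p)))).map
            (Prod.snd ∘ fun c => (c, p)) = ((g p).filter (· == node)).map (fun _ => p) := by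
          simp [Function.comp_def]
        rw [this]
        by_cases hq : q = p
        · subst hq
          simp [List.count_eq_countP, List.countP_eq_length_filter]
        · simp [List.count_eq_zero, hq]
      rw [hhead]
      by_cases hq : q = p
      · subst hq; simp [hpt]
      · simp [hq, List.mem_cons]

-- pushing v to every element of plist adds (count of q) · v at q
theorem pvPushFold (plist : List String) (inc : PySem.Dict String Int) (v : Int) (q : String) :
    (plist.foldl (fun i p => i.modify p 0 (· + v)) inc).getD q 0
      = inc.getD q 0 + (plist.count q : Int) * v := by
  induction plist generalizing inc with
  | nil => simp
  | cons p t ih =>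
      rw [List.foldl_cons, ih, PySem.Dict.getD_modify, List.count_cons]
      by_cases hq : q = p
      · subst hq; simp; ring
      · simp [hq, Ne.symm hq]

-- updating g at one point shifts the sum by (count) · v
theorem pvSumInsert (ks : List String) (g : String → Int) (node : String) (v : Int)
    (h0 : g node = 0) :
    (ks.map (fun c => if c = node then v else g c)).sum
      = (ks.map g).sum + (ks.count node : Int) * v := by
  induction ks with
  | nil => simp
  | cons c t ih =>
      rw [List.map_cons, List.map_cons, List.sum_cons, List.sum_cons, ih, List.count_cons]
      by_cases hc : c = node
      · subst hc; simp [h0]; ring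
      · simp [hc]; ring

-- the push/pull invariant: along any duplicate-free processing order, B's
-- output dict tracks A's, provided 'incoming' always holds, for every q,
-- the sum A's gather step would read for q's children right now
theorem pvMain (cmd : PySem.Dict String (List String)) (lcd : PySem.Dict String Int)
    (parents : PySem.Dict String (List String))
    (hpar : ∀ node q, (parents.getD node []).count q = (cmd.getD q []).count node) :
    ∀ (l : List String), l.Nodup →
    ∀ (nc inc : PySem.Dict String Int),
    (∀ n ∈ l, nc.getD n 0 = 0) →
    (∀ q, inc.getD q 0 = ((cmd.getD q []).map (fun c => nc.getD c 0)).sum) →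
    (l.foldl (pvStepB parents lcd) (nc, inc)).1 = l.foldl (pvStepA cmd lcd) nc := by
  intro l
  induction l with
  | nil => intro _ nc inc _ _; rfl
  | cons node t ih =>
      intro hnd nc inc hnc hinc
      have hnd' := (List.nodup_cons.1 hnd).2
      have hnt := (List.nodup_cons.1 hnd).1
      have hnode0 : nc.getD node 0 = 0 := hnc node (by simp)
      -- the value both sides store for node
      set v := lcd.getD node 0 + inc.getD node 0 with hv
      have hA : pvStepA cmd lcd nc node = nc.insert node v := by
        simp only [pvStepA, hv, hinc node]
        rcases hk : cmd.getD node [] with _ | ⟨c, r⟩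
        · simp
        · rw [if_neg (by simp), PySem.List.foldl_add]
          ring_nf
      rw [List.foldl_cons, List.foldl_cons, hA]
      have hB : pvStepB parents lcd (nc, inc) node
          = (nc.insert node v,
             (parents.getD node []).foldl (fun inc p => inc.modify p 0 (· + v)) inc) := rfl
      rw [hB]
      apply ih hnd'
      · intro n hn
        rw [PySem.Dict.getD_insert]
        have : n ≠ node := fun h => hnt (h ▸ hn)
        simp [this]
        exact hnc n (by simp [hn])
      · intro q
        rw [pvPushFold, hinc q, hpar node q]
        have hmap : (cmd.getD q []).map (fun c => (nc.insert node v).getD c 0)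
            = (cmd.getD q []).map (fun c => if c = node then v else nc.getD c 0) := by
          apply List.map_congr_left
          intro c _
          rw [PySem.Dict.getD_insert]
        rw [hmap, pvSumInsert _ _ _ _ hnode0]

-- ===== VERDICT (by name: the statement is the Claim_ definition above) =====
theorem aggregate_counts_over_tree_spec : Claim_equal_aggregate_counts_over_tree := by
  intro cm lc _
  show _ = _
  simp only [aggregate_counts_over_tree, aggregate_counts_over_tree_alt]
  have hknd : (PySem.Dict.ofList cm).keys.Nodup := PySem.Dict.nodup_keys_ofList cm
  -- characterise the parents map
  have hpar : ∀ node q,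
      (((PySem.Dict.ofList cm).items.foldl
          (fun b pk => pk.2.foldl (fun b c => b.modify c [] (· ++ [pk.1])) b)
          (PySem.Dict.empty : PySem.Dict String (List String))).getD node []).count q
        = ((PySem.Dict.ofList cm).getD q []).count node := by
    intro node q
    rw [pvParentsFold, PySem.Dict.getD_foldl_modify_append,
      PySem.Dict.items_eq_map_keys (PySem.Dict.ofList cm) hknd [], List.flatMap_map,
      PySem.Dict.getD_empty, List.nil_append]
    rw [pvCountEdges (PySem.Dict.ofList cm).keys (fun p => (PySem.Dict.ofList cm).getD p [])
      node q hknd]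
    by_cases hq : q ∈ (PySem.Dict.ofList cm).keys
    · simp [hq]
    · have : (PySem.Dict.ofList cm).getD q [] = [] := by
        apply PySem.Dict.getD_of_not_contains
        rw [PySem.Dict.contains_eq_decide_mem_keys]
        simp [hq]
      simp [hq, this]
  have hndsorted : (PySem.List.sorted (PySem.Dict.ofList cm).keys pvDot true).Nodup :=
    (PySem.List.sorted_perm (PySem.Dict.ofList cm).keys pvDot true).symm.nodup hknd
  rw [pvMain (PySem.Dict.ofList cm) (PySem.Dict.ofList lc) _ hpar
    (PySem.List.sorted (PySem.Dict.ofList cm).keys pvDot true) hndsorted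
    PySem.Dict.empty PySem.Dict.empty (by intro n _; simp [PySem.Dict.getD_empty])
    (by intro q; simp [PySem.Dict.getD_empty])]
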